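-- pv_equiv track=rewrite | github.com/xenophony/bs-server | battleship_agents/board_utils.py | num_ships_that_can_fit_here
-- ===== SOURCE A (Python) =====
-- def num_ships_that_can_fit_here(board, remaining, r, c):
--     """
--     Count how many ships in `remaining` could legally fit covering cell (r,c).
--     A ship fits if there is enough contiguous '.' or '_' cells in a row/col
--     including (r,c) to place it without overlap.
--     """
--     count = 0
--     for size in remaining:
--         # Horizontal check
--         for start_c in range(c - size + 1, c + 1):
--             if 0 <= start_c and start_c + size <= 10:
--                 segment = [board[r][cc] for cc in range(start_c, start_c + size)]
--                 if all(cell in [".", "_"] for cell in segment):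
--                     count += 1
--                     break  # only count once per orientation
--
--         # Vertical check
--         for start_r in range(r - size + 1, r + 1):
--             if 0 <= start_r and start_r + size <= 10:
--                 segment = [board[rr][c] for rr in range(start_r, start_r + size)]
--                 if all(cell in [".", "_"] for cell in segment):
--                     count += 1
--                     break
--     return count
-- ===== SOURCE B (Python) =====
-- def num_ships_that_can_fit_here(board, remaining, r, c):
--     """
--     Count how many ships in `remaining` could legally fit covering cell (r,c).
--     Measures the free run through (r,c) horizontally and vertically once,
--     then a ship of size s fits in an orientation iff 1 <= s <= run length.
--     """
--     def run_length(get, idx):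
--         if not (0 <= idx < 10) or get(idx) not in (".", "_"):
--             return 0
--         lo = idx
--         while lo > 0 and get(lo - 1) in (".", "_"):
--             lo -= 1
--         hi = idx
--         while hi < 9 and get(hi + 1) in (".", "_"):
--             hi += 1
--         return hi - lo + 1
--
--     lh = run_length(lambda cc: board[r][cc], c)
--     lv = run_length(lambda rr: board[rr][c], r)
--     return sum(1 for s in remaining if 1 <= s <= lh) + \
--            sum(1 for s in remaining if 1 <= s <= lv)
-- ===== Notes on version B (the rewrite author's own statement) =====
-- stated objective: alternative
-- what changed: Instead of rescanning every placement window for every ship size, B measures the free run through (r,c) once per orientation (extend left/right and up/down) and then counts the sizes s with 1 <= s <= run length; per-size work drops from a window rescan to one comparison (speed not verified).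
-- outside the precondition, e.g. on num_ships_that_can_fit_here([], [], 0, 0): A returns 0, B raises IndexError; on num_ships_that_can_fit_here([['.']], [], 0, 0): A returns 0, B raises IndexError
import Mathlib
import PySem

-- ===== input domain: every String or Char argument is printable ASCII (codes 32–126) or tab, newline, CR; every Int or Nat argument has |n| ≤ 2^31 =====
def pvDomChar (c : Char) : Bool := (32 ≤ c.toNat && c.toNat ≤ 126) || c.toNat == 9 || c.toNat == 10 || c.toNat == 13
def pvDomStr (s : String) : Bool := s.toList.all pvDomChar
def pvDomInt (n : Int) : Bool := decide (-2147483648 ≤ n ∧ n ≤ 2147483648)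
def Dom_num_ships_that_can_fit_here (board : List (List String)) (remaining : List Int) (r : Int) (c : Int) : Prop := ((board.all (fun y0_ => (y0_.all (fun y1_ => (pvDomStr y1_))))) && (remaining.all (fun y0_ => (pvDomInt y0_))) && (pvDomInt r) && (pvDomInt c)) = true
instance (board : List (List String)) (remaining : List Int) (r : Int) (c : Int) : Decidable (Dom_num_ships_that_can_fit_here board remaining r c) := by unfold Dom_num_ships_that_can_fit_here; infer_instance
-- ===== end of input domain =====

-- B replaces A's per-size window rescan by a single free-run-length measurement per
-- orientation followed by one comparison per ship size (objective: alternative algorithm).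

-- ===== PORT A =====
def pvFreeA (s : String) : Bool := s == "." || s == "_"

def pvCellA (board : List (List String)) (i j : Int) : String :=
  PySem.List.pyGetD (PySem.List.pyGetD board i []) j ""

-- A's inner 'for start in range(...): if bounds: if all free: count += 1; break'
def pvLoopA (cell : Int → String) (size : Int) : List Int → Bool
  | [] => false
  | sc :: rest =>
    if 0 ≤ sc ∧ sc + size ≤ 10 then
      if ((PySem.List.pyRange sc (sc + size) 1).map cell).all pvFreeA then true
      else pvLoopA cell size rest
    else pvLoopA cell size rest

def num_ships_that_can_fit_here (board : List (List String)) (remaining : List Int) (r : Int) (c : Int) : Int :=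
  remaining.foldl (fun count size =>
    let count1 :=
      if pvLoopA (fun cc => pvCellA board r cc) size (PySem.List.pyRange (c - size + 1) (c + 1) 1)
      then count + 1 else count
    if pvLoopA (fun rr => pvCellA board rr c) size (PySem.List.pyRange (r - size + 1) (r + 1) 1)
    then count1 + 1 else count1) 0

-- ===== PORT B =====
def pvFreeB (s : String) : Bool := s == "." || s == "_"

def pvCellB (board : List (List String)) (i j : Int) : String :=
  PySem.List.pyGetD (PySem.List.pyGetD board i []) j ""

-- 'while lo > 0 and get(lo-1) free: lo -= 1'  (fuel 10 covers lo ∈ [0,10))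
def pvLoB (get : Int → String) : Nat → Int → Int
  | 0, lo => lo
  | fuel + 1, lo => if 0 < lo ∧ pvFreeB (get (lo - 1)) then pvLoB get fuel (lo - 1) else lo

-- 'while hi < 9 and get(hi+1) free: hi += 1'
def pvHiB (get : Int → String) : Nat → Int → Int
  | 0, hi => hi
  | fuel + 1, hi => if hi < 9 ∧ pvFreeB (get (hi + 1)) then pvHiB get fuel (hi + 1) else hi

def pvRunB (get : Int → String) (idx : Int) : Int :=
  if 0 ≤ idx ∧ idx < 10 then
    if pvFreeB (get idx) then pvHiB get 10 idx - pvLoB get 10 idx + 1 else 0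
  else 0

def num_ships_that_can_fit_here_alt (board : List (List String)) (remaining : List Int) (r : Int) (c : Int) : Int :=
  let lh := pvRunB (fun cc => pvCellB board r cc) c
  let lv := pvRunB (fun rr => pvCellB board rr c) r
  ((remaining.filter (fun s => decide (1 ≤ s ∧ s ≤ lh))).length : Int)
  + ((remaining.filter (fun s => decide (1 ≤ s ∧ s ≤ lv))).length : Int)

-- ===== PRECONDITION & SPEC =====
-- Pre_ requires the board to be large enough for every cell an orientation can touch (a valid
-- row index r and ≥10-cell rows when 0 ≤ c < 10; ≥10 rows and a valid column index c when
-- 0 ≤ r < 10); outside it A raises IndexError whenever a placement window is probed and returns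
-- only a trivial 0 when no probe can happen.
def Pre_num_ships_that_can_fit_here (board : List (List String)) (remaining : List Int) (r : Int) (c : Int) : Prop :=
  (0 ≤ c ∧ c ≤ 9 → PySem.Raise.InRange board.length r ∧ ∀ row ∈ board, 10 ≤ row.length) ∧
  (0 ≤ r ∧ r ≤ 9 → 10 ≤ board.length ∧ ∀ row ∈ board, PySem.Raise.InRange row.length c)
instance (board : List (List String)) (remaining : List Int) (r : Int) (c : Int) : Decidable (Pre_num_ships_that_can_fit_here board remaining r c) := by unfold Pre_num_ships_that_can_fit_here; infer_instance

def pvWitness_num_ships_that_can_fit_here : List (List String) × List Int × Int × Int :=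
  (List.replicate 10 (List.replicate 10 "."), [2, 3], 4, 5)

def Spec_num_ships_that_can_fit_here (board : List (List String)) (remaining : List Int) (r : Int) (c : Int) (out : Int) : Prop := out = num_ships_that_can_fit_here_alt board remaining r c
instance (board : List (List String)) (remaining : List Int) (r : Int) (c : Int) (out : Int) : Decidable (Spec_num_ships_that_can_fit_here board remaining r c out) := by unfold Spec_num_ships_that_can_fit_here; infer_instance

-- ===== CLAIM (what is proved, stated in full; the proofs are below) =====
def Claim_equal_num_ships_that_can_fit_here : Prop := ∀ (board : List (List String)) (remaining : List Int) (r : Int) (c : Int), Dom_num_ships_that_can_fit_here board remaining r c → Pre_num_ships_that_can_fit_here board remaining r c → Spec_num_ships_that_can_fit_here board remaining r c (num_ships_that_can_fit_here board remaining r c)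

-- ===== LEMMAS AND PROOFS =====

theorem pvWitness_ok :
    Dom_num_ships_that_can_fit_here (pvWitness_num_ships_that_can_fit_here.1) (pvWitness_num_ships_that_can_fit_here.2.1) (pvWitness_num_ships_that_can_fit_here.2.2.1) (pvWitness_num_ships_that_can_fit_here.2.2.2) ∧
    Pre_num_ships_that_can_fit_here (pvWitness_num_ships_that_can_fit_here.1) (pvWitness_num_ships_that_can_fit_here.2.1) (pvWitness_num_ships_that_can_fit_here.2.2.1) (pvWitness_num_ships_that_can_fit_here.2.2.2) := by
  constructor <;> decide

-- A's break-loop returns true iff some start position in the list passes both tests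
theorem pvLoopA_eq_any (cell : Int → String) (size : Int) (L : List Int) :
    pvLoopA cell size L = true ↔
      ∃ sc ∈ L, (0 ≤ sc ∧ sc + size ≤ 10) ∧
        ((PySem.List.pyRange sc (sc + size) 1).map cell).all pvFreeA = true := by
  induction L with
  | nil => simp [pvLoopA]
  | cons sc rest ih =>
    simp only [pvLoopA]
    split_ifs with h1 h2
    · constructor
      · intro _; exact ⟨sc, List.mem_cons_self, h1, h2⟩
      · intro _; rfl
    · simp only [ih, List.mem_cons]
      constructor
      · rintro ⟨x, hx, hc⟩; exact ⟨x, Or.inr hx, hc⟩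
      · rintro ⟨x, hx | hx, hc⟩
        · subst hx; exact absurd hc.2 (by simp [h2])
        · exact ⟨x, hx, hc⟩
    · simp only [ih, List.mem_cons]
      constructor
      · rintro ⟨x, hx, hc⟩; exact ⟨x, Or.inr hx, hc⟩
      · rintro ⟨x, hx | hx, hc⟩
        · subst hx; exact absurd hc.1 h1
        · exact ⟨x, hx, hc⟩

theorem pvAllFree (cell : Int → String) (a b : Int) :
    ((PySem.List.pyRange a b 1).map cell).all pvFreeA = true ↔
      ∀ i, a ≤ i → i < b → pvFreeA (cell i) = true := by
  simp only [List.all_eq_true, List.mem_map]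
  constructor
  · intro h i h1 h2
    exact h _ ⟨i, (PySem.List.mem_pyRange_one).2 ⟨h1, h2⟩, rfl⟩
  · rintro h x ⟨i, hi, rfl⟩
    obtain ⟨h1, h2⟩ := (PySem.List.mem_pyRange_one).1 hi
    exact h i h1 h2

-- characterization of the leftward extension
theorem pvLoB_spec (get : Int → String) : ∀ (fuel : Nat) (lo : Int), 0 ≤ lo → lo.toNat ≤ fuel →
    0 ≤ pvLoB get fuel lo ∧ pvLoB get fuel lo ≤ lo ∧
    (∀ i, pvLoB get fuel lo ≤ i → i < lo → pvFreeB (get i) = true) ∧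
    (pvLoB get fuel lo = 0 ∨ pvFreeB (get (pvLoB get fuel lo - 1)) = false) := by
  intro fuel
  induction fuel with
  | zero =>
    intro lo h0 hf
    have : lo = 0 := by omega
    subst this
    exact ⟨le_refl _, le_refl _, fun i h1 h2 => absurd (lt_of_le_of_lt h1 h2) (by simp [pvLoB]), Or.inl rfl⟩
  | succ n ih =>
    intro lo h0 hf
    simp only [pvLoB]
    split_ifs with h
    · obtain ⟨hA, hB, hC, hD⟩ := ih (lo - 1) (by omega) (by omega)
      refine ⟨hA, by omega, ?_, hD⟩
      intro i h1 h2
      rcases lt_or_ge i (lo - 1) with h3 | h3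
      · exact hC i h1 h3
      · have : i = lo - 1 := by omega
        subst this; exact h.2
    · refine ⟨h0, le_refl _, fun i h1 h2 => absurd (lt_of_le_of_lt h1 h2) (lt_irrefl _), ?_⟩
      rcases eq_or_lt_of_le h0 with h2 | h2
      · exact Or.inl h2.symm
      · right
        by_contra hcon
        exact h ⟨h2, by simpa using hcon⟩

-- characterization of the rightward extension
theorem pvHiB_spec (get : Int → String) : ∀ (fuel : Nat) (hi : Int), hi ≤ 9 → (9 - hi).toNat ≤ fuel →
    hi ≤ pvHiB get fuel hi ∧ pvHiB get fuel hi ≤ 9 ∧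
    (∀ i, hi < i → i ≤ pvHiB get fuel hi → pvFreeB (get i) = true) ∧
    (pvHiB get fuel hi = 9 ∨ pvFreeB (get (pvHiB get fuel hi + 1)) = false) := by
  intro fuel
  induction fuel with
  | zero =>
    intro hi h9 hf
    have : hi = 9 := by omega
    subst this
    exact ⟨le_refl _, le_refl _, fun i h1 h2 => absurd (lt_of_lt_of_le h1 h2) (by simp [pvHiB]), Or.inl rfl⟩
  | succ n ih =>
    intro hi h9 hf
    simp only [pvHiB]
    split_ifs with h
    · obtain ⟨hA, hB, hC, hD⟩ := ih (hi + 1) (by omega) (by omega)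
      refine ⟨by omega, hB, ?_, hD⟩
      intro i h1 h2
      rcases lt_or_ge (hi + 1) i with h3 | h3
      · exact hC i h3 h2
      · have : i = hi + 1 := by omega
        subst this; exact h.2
    · refine ⟨le_refl _, h9, fun i h1 h2 => absurd (lt_of_lt_of_le h1 h2) (lt_irrefl _), ?_⟩
      rcases eq_or_lt_of_le h9 with h2 | h2
      · exact Or.inl h2
      · right
        by_contra hcon
        exact h ⟨h2, by simpa using hcon⟩

-- the heart: A's per-size window scan succeeds iff 1 ≤ size ≤ the free run length through idx
theorem pvCore (cell : Int → String) (idx size : Int) :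
    pvLoopA cell size (PySem.List.pyRange (idx - size + 1) (idx + 1) 1)
      = decide (1 ≤ size ∧ size ≤ pvRunB cell idx) := by
  have hfree : pvFreeB = pvFreeA := rfl
  rw [Bool.eq_iff_iff, pvLoopA_eq_any, decide_eq_true_iff]
  simp only [PySem.List.mem_pyRange_one]
  unfold pvRunB
  split_ifs with hidx hf
  · -- idx in range and free
    obtain ⟨hlo0, hlole, hloF, hloE⟩ := pvLoB_spec cell 10 idx hidx.1 (by omega)
    obtain ⟨hhige, hhile, hhiF, hhiE⟩ := pvHiB_spec cell 10 idx (by omega) (by omega)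
    set lo := pvLoB cell 10 idx with hLO
    set hi := pvHiB cell 10 idx with hHI
    constructor
    · rintro ⟨sc, ⟨hs1, hs2⟩, ⟨hs3, hs4⟩, hall⟩
      rw [pvAllFree] at hall
      have hsz : 1 ≤ size := by omega
      refine ⟨hsz, ?_⟩
      have hlosc : lo ≤ sc := by
        by_contra hcon
        push Not at hcon
        have h1 : pvFreeA (cell (lo - 1)) = true := hall _ (by omega) (by omega)
        rcases hloE with h0 | h0
        · omega
        · rw [hfree] at h0; rw [h0] at h1; exact absurd h1 (by simp)
      have hhisc : sc + size - 1 ≤ hi := by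
        by_contra hcon
        push Not at hcon
        have h1 : pvFreeA (cell (hi + 1)) = true := hall _ (by omega) (by omega)
        rcases hhiE with h0 | h0
        · omega
        · rw [hfree] at h0; rw [h0] at h1; exact absurd h1 (by simp)
      omega
    · rintro ⟨hsz, hle⟩
      refine ⟨max lo (idx - size + 1), ⟨by omega, by omega⟩, ⟨by omega, by omega⟩, ?_⟩
      rw [pvAllFree]
      intro i h1 h2
      rcases lt_trichotomy i idx with h3 | h3 | h3
      · rw [← hfree]; exact hloF i (by omega) h3
      · subst h3; rw [← hfree]; exact hf
      · rw [← hfree]; exact hhiF i h3 (by omega)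
  · -- idx in range but blocked: no window can cover it
    constructor
    · rintro ⟨sc, ⟨hs1, hs2⟩, ⟨hs3, hs4⟩, hall⟩
      rw [pvAllFree] at hall
      have h1 : pvFreeA (cell idx) = true := hall idx (by omega) (by omega)
      rw [← hfree] at h1
      rw [h1] at hf; exact absurd rfl hf
    · rintro ⟨h1, h2⟩; omega
  · -- idx outside [0,10): the bounds tests refuse every window
    constructor
    · rintro ⟨sc, ⟨hs1, hs2⟩, ⟨hs3, hs4⟩, _⟩; omega
    · rintro ⟨h1, h2⟩; omega

-- A's two-increment fold equals the two filtered counts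
theorem pvFoldCount (H V : Int → Bool) : ∀ (l : List Int) (a : Int),
    l.foldl (fun count size =>
        let count1 := if H size then count + 1 else count
        if V size then count1 + 1 else count1) a
      = a + ((l.filter H).length : Int) + ((l.filter V).length : Int) := by
  intro l
  induction l with
  | nil => intro a; simp
  | cons x xs ih =>
    intro a
    simp only [List.foldl_cons, List.filter_cons, ih]
    by_cases h1 : H x <;> by_cases h2 : V x <;> simp [h1, h2] <;> push_cast <;> ring

-- ===== VERDICT (by name: the statement is the Claim_ definition above) =====
theorem num_ships_that_can_fit_here_spec : Claim_equal_num_ships_that_can_fit_here := by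
  intro board remaining r c _ _
  unfold Spec_num_ships_that_can_fit_here
  unfold num_ships_that_can_fit_here num_ships_that_can_fit_here_alt
  have hcell : pvCellB = pvCellA := rfl
  simp only [pvCore, hcell, pvFoldCount]
  ring
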